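-- pv_equiv track=rewrite | github.com/olchrkk/Olga-Kazachinskaya-NHS | Homework/hw_4.1.py | sum_of_same_numbers
-- ===== SOURCE A (Python) =====
-- def sum_of_same_numbers(lst):
--     my_dict = {}
--     my_sum = 0
--     for i in lst:
--         if i in my_dict:
--             my_dict[i] += 1
--         else:
--             my_dict[i] = 1
--     for j in my_dict:
--         if my_dict[j] > 1:
--             my_sum += 1
--     return my_sum
-- ===== SOURCE B (Python) =====
-- def sum_of_same_numbers(lst):
--     s = sorted(lst)
--     total = 0
--     i = 0
--     n = len(s)
--     while i < n:
--         j = i + 1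
--         while j < n and s[j] == s[i]:
--             j += 1
--         if j - i > 1:
--             total += 1
--         i = j
--     return total
-- ===== Notes on version B (the rewrite author's own statement) =====
-- stated objective: alternative
-- what changed: Replaced the hash-count dictionary plus a second loop over its keys by sorting the list and scanning maximal runs of equal adjacent elements, counting runs of length at least two.
import Mathlib
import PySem

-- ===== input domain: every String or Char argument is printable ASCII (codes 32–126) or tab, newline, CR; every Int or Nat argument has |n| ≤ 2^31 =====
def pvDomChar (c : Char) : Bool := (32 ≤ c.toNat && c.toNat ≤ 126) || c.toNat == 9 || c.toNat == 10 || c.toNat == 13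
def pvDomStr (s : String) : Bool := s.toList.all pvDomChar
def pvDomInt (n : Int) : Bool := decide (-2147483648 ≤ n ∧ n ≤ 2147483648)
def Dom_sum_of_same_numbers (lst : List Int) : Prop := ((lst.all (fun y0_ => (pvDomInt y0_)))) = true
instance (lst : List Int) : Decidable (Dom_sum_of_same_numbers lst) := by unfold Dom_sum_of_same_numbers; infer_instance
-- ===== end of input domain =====

-- B sorts the list and scans maximal runs of equal adjacent elements, counting runs of
-- length ≥ 2, instead of A's hash-count dictionary plus a second loop (objective: alternative).

-- ===== PORT A =====
def sum_of_same_numbers (lst : List Int) : Int :=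
  let my_dict : PySem.Dict Int Int :=
    lst.foldl (fun d i =>
      if d.contains i then d.insert i (d.getD i 0 + 1) else d.insert i 1)
      PySem.Dict.empty
  my_dict.keys.foldl (fun my_sum j =>
      if my_dict.getD j 0 > 1 then my_sum + 1 else my_sum) 0

-- ===== PORT B =====
-- The outer while loop consumes the sorted list run by run; the inner scan for the
-- end of the run of s[i] is the takeWhile/dropWhile split of the remainder.
def pvRuns : List Int → Int
  | [] => 0
  | x :: xs =>
    let run := xs.takeWhile (fun y => y == x)
    let rest := xs.dropWhile (fun y => y == x)
    (if run.length + 1 > 1 then 1 else 0) + pvRuns rest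
termination_by l => l.length
decreasing_by
  simpa using Nat.lt_succ_of_le (List.length_dropWhile_le _ _)

def sum_of_same_numbers_alt (lst : List Int) : Int :=
  pvRuns (PySem.List.sorted lst (fun x => x) false)

-- ===== PRECONDITION & SPEC =====
def Spec_sum_of_same_numbers (lst : List Int) (out : Int) : Prop := out = sum_of_same_numbers_alt lst
instance (lst : List Int) (out : Int) : Decidable (Spec_sum_of_same_numbers lst out) := by unfold Spec_sum_of_same_numbers; infer_instance

-- ===== CLAIM (what is proved, stated in full; the proofs are below) =====
def Claim_equal_sum_of_same_numbers : Prop := ∀ (lst : List Int), Dom_sum_of_same_numbers lst → Spec_sum_of_same_numbers lst (sum_of_same_numbers lst)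

-- ===== LEMMAS AND PROOFS =====

-- A's result is the number of distinct elements of lst occurring at least twice.
lemma A_val (lst : List Int) :
    sum_of_same_numbers lst =
      (((PySem.Set.ofList lst).countP (fun j => decide (2 ≤ lst.count j)) : Nat) : Int) := by
  unfold sum_of_same_numbers
  have hstep : lst.foldl (fun (d : PySem.Dict Int Int) i =>
        if d.contains i then d.insert i (d.getD i 0 + 1) else d.insert i 1)
        PySem.Dict.empty
      = lst.foldl (fun (d : PySem.Dict Int Int) i => d.insert i (d.getD i 0 + 1))
        PySem.Dict.empty := by
    apply PySem.List.foldl_congr_mem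
    intro d x _
    by_cases h : d.contains x
    · simp [h]
    · have h0 : d.getD x 0 = 0 := by
        have hb : d.contains x = false := by simpa using h
        simp [PySem.Dict.getD_of_not_contains, hb]
      simp [h, h0]
  simp only [hstep, PySem.Dict.foldl_insert_getD_add_one_eq_counter]
  rw [PySem.List.foldl_ite_add_one
        (p := fun j => (PySem.Dict.counter lst).getD j 0 > 1)]
  rw [PySem.Dict.keys_counter, zero_add]
  congr 1
  apply List.countP_congr
  intro j _
  rw [PySem.Dict.getD_counter]
  simp only [decide_eq_true_eq, gt_iff_lt]
  omega

-- countP over a nodup list depends only on the element set and the predicate's values there.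
lemma countP_ext_nodup (L M : List Int) (p q : Int → Bool)
    (hL : L.Nodup) (hM : M.Nodup)
    (hmem : ∀ a, a ∈ L ↔ a ∈ M) (hpq : ∀ a ∈ M, p a = q a) :
    L.countP p = M.countP q := by
  rw [List.countP_eq_length_filter, List.countP_eq_length_filter]
  apply List.Perm.length_eq
  rw [List.perm_ext_iff_of_nodup (hL.filter p) (hM.filter q)]
  intro a
  simp only [List.mem_filter]
  constructor
  · rintro ⟨ha, hp⟩
    have haM := (hmem a).1 ha
    exact ⟨haM, by rw [← hpq a haM]; exact hp⟩
  · rintro ⟨ha, hq⟩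
    exact ⟨(hmem a).2 ha, by rw [hpq a ha]; exact hq⟩

-- In a sorted list whose elements are all ≥ x, dropping the leading run of x's drops every x.
lemma not_mem_dropWhile_sorted (x : Int) : ∀ (xs : List Int),
    (∀ y ∈ xs, x ≤ y) → xs.Pairwise (· ≤ ·) → x ∉ xs.dropWhile (fun y => y == x) := by
  intro xs
  induction xs with
  | nil => intro _ _; simp
  | cons a xs ih =>
    intro hle hpw
    by_cases ha : (a == x) = true
    · rw [List.dropWhile_cons, if_pos ha]
      exact ih (fun y hy => hle y (List.mem_cons_of_mem a hy)) (List.pairwise_cons.mp hpw).2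
    · rw [List.dropWhile_cons, if_neg ha]
      have hax : a ≠ x := by simpa using ha
      have hxa : x < a := lt_of_le_of_ne (hle a (List.mem_cons_self)) (Ne.symm hax)
      intro hmem
      rcases List.mem_cons.mp hmem with heq | hmem'
      · exact hax heq.symm
      · have := (List.pairwise_cons.mp hpw).1 x hmem'
        omega

-- On a sorted (≤-pairwise) list, the run scan counts the distinct elements of count ≥ 2.
lemma pvRuns_val : ∀ (n : Nat) (s : List Int), s.length ≤ n → s.Pairwise (· ≤ ·) →
    pvRuns s = (((PySem.Set.ofList s).countP (fun j => decide (2 ≤ s.count j)) : Nat) : Int) := by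
  intro n
  induction n with
  | zero =>
    intro s hlen _
    have : s = [] := List.eq_nil_of_length_eq_zero (Nat.le_zero.mp hlen)
    subst this
    simp [pvRuns]
  | succ n ih =>
    intro s hlen hsort
    match s with
    | [] => simp [pvRuns]
    | x :: xs =>
      have hsplit : xs.takeWhile (fun y => y == x) ++ xs.dropWhile (fun y => y == x) = xs :=
        List.takeWhile_append_dropWhile
      set t := xs.takeWhile (fun y => y == x) with ht
      set r := xs.dropWhile (fun y => y == x) with hr
      -- all elements of t equal x
      have htx : ∀ y ∈ t, y = x := by
        intro y hy
        have := List.mem_takeWhile_imp hy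
        simpa using this
      -- pairwise facts
      have hxs_pw : xs.Pairwise (· ≤ ·) := (List.pairwise_cons.mp hsort).2
      have hx_le : ∀ y ∈ xs, x ≤ y := (List.pairwise_cons.mp hsort).1
      have hr_pw : r.Pairwise (· ≤ ·) := hxs_pw.sublist (List.dropWhile_sublist _)
      -- x is not in r
      have hxr : x ∉ r := by
        rw [hr]
        exact not_mem_dropWhile_sorted x xs hx_le hxs_pw
      -- counts
      have hcount_x : (x :: xs).count x = t.length + 1 := by
        rw [← hsplit]
        have h1 : t.count x = t.length := by
          rw [List.count_eq_length]
          intro y hy; have := htx y hy; simp [this]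
        have h2 : r.count x = 0 := List.count_eq_zero.mpr hxr
        simp [List.count_append, h1, h2]
      have hcount_r : ∀ j ∈ r, (x :: xs).count j = r.count j := by
        intro j hj
        have hjx : j ≠ x := fun h => hxr (h ▸ hj)
        have hxj : x ≠ j := Ne.symm hjx
        rw [← hsplit]
        have h1 : t.count j = 0 := by
          rw [List.count_eq_zero]
          intro hjt; exact hjx (htx j hjt)
        simp [List.count_append, h1, hxj]
      -- membership of the distinct-element lists
      have hmem_s : ∀ a, a ∈ PySem.Set.ofList (x :: xs) ↔ a ∈ x :: PySem.Set.ofList r := by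
        intro a
        simp only [PySem.Set.mem_ofList, List.mem_cons, ← hsplit, List.mem_append]
        constructor
        · rintro (h | h | h)
          · exact Or.inl h
          · exact Or.inl (htx a h)
          · exact Or.inr h
        · rintro (h | h)
          · exact Or.inl h
          · exact Or.inr (Or.inr h)
      have hnodup_cons : (x :: PySem.Set.ofList r).Nodup := by
        refine List.nodup_cons.mpr ⟨?_, PySem.Set.nodup_ofList r⟩
        rw [PySem.Set.mem_ofList]; exact hxr
      -- rewrite countP through the extensionality lemma
      have hc : (PySem.Set.ofList (x :: xs)).countP (fun j => decide (2 ≤ (x :: xs).count j))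
          = (x :: PySem.Set.ofList r).countP (fun j => decide (2 ≤ (x :: xs).count j)) :=
        countP_ext_nodup _ _ _ _ (PySem.Set.nodup_ofList _) hnodup_cons hmem_s (fun _ _ => rfl)
      have hc2 : (PySem.Set.ofList r).countP (fun j => decide (2 ≤ (x :: xs).count j))
          = (PySem.Set.ofList r).countP (fun j => decide (2 ≤ r.count j)) := by
        apply List.countP_congr
        intro j hj
        rw [PySem.Set.mem_ofList] at hj
        rw [hcount_r j hj]
      have hlen_r : r.length ≤ n := by
        have h1 : r.length ≤ xs.length := List.length_dropWhile_le _ _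
        simpa using Nat.le_trans h1 (Nat.le_of_succ_le_succ hlen)
      have hih := ih r hlen_r hr_pw
      rw [pvRuns]
      show (if t.length + 1 > 1 then 1 else 0) + pvRuns r = _
      rw [hih, hc, List.countP_cons, hc2, hcount_x]
      simp only [decide_eq_true_eq]
      split_ifs <;> push_cast <;> omega

-- B's result is the same count, transferred from the sorted list back to lst.
lemma B_val (lst : List Int) :
    sum_of_same_numbers_alt lst =
      (((PySem.Set.ofList lst).countP (fun j => decide (2 ≤ lst.count j)) : Nat) : Int) := by
  unfold sum_of_same_numbers_alt
  set s := PySem.List.sorted lst (fun x => x) false with hs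
  have hperm : s.Perm lst := PySem.List.sorted_perm lst (fun x => x) false
  have hpw : s.Pairwise (· ≤ ·) := by
    simpa using PySem.List.sorted_pairwise lst (fun x => x)
  rw [pvRuns_val s.length s le_rfl hpw]
  congr 1
  apply countP_ext_nodup _ _ _ _ (PySem.Set.nodup_ofList _) (PySem.Set.nodup_ofList _)
  · intro a
    rw [PySem.Set.mem_ofList, PySem.Set.mem_ofList]
    exact hperm.mem_iff
  · intro a _
    rw [hperm.count_eq]

-- ===== VERDICT (by name: the statement is the Claim_ definition above) =====
theorem sum_of_same_numbers_spec : Claim_equal_sum_of_same_numbers := by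
  intro lst _
  unfold Spec_sum_of_same_numbers
  rw [A_val, B_val]
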